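-- pv_equiv track=rewrite | github.com/jpdamon/elements-computing | tests/util.py | int_as_register
-- ===== SOURCE A (Python) =====
-- def int_as_register(integer, n):
--     """ Convert a (nonnegative) integer to a register of n-bits.
--     int_as_register(9, 4) returns [1,0,0,1]
--     """
--
--     register = [1 if digit == '1' else 0 for digit in bin(integer)[2:]]
--
--     if len(register) == n:
--         return register
--     elif len(register) > n:
--         # return least significant n bits, discarding overflow
--         return register[-n:]
--     else:
--         # pad with zeros
--         while len(register) < n:
--             register = [0] + register
--
--         return register
-- ===== SOURCE B (Python) =====
-- def int_as_register(integer, n):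
--     """Same result as A: binary digits computed by arithmetic bit extraction
--     (x & 1 / x >>= 1) instead of bin() string formatting; padding built with
--     list multiplication instead of a prepend loop."""
--     bits = []
--     x = integer
--     while x > 0:
--         bits.append(x & 1)
--         x >>= 1
--     bits.reverse()
--     if not bits:
--         bits = [0]
--     if len(bits) < n:
--         return [0] * (n - len(bits)) + bits
--     return bits[-n:]
-- ===== Notes on version B (the rewrite author's own statement) =====
-- stated objective: alternative
-- what changed: Binary digits are computed by an arithmetic bit-extraction loop (x&1, x>>=1, then reverse) instead of parsing the bin() string, and zero padding is built in one step with list multiplication instead of repeated list prepending.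
-- outside the precondition, e.g. on int_as_register(-5, 3): A returns [1, 0, 1], B returns [0, 0, 0]
import Mathlib
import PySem

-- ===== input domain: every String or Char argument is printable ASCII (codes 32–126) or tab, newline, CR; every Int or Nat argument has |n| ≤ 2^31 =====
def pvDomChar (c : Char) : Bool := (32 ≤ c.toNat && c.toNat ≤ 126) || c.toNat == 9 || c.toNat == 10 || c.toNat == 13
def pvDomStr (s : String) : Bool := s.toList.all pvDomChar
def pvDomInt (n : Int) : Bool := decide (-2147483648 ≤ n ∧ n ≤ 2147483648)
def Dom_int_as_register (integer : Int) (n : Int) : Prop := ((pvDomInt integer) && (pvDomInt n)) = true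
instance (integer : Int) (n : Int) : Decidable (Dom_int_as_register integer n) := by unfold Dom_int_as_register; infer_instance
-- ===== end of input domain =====

-- B computes the binary digits by arithmetic bit extraction and pads in one step,
-- instead of A's bin()-string parsing and one-by-one prepend loop (alternative decomposition, same cost class).


-- ===== PORT A =====
-- digits of bin(m) for m : Nat, m > 0 (msb first); bin(0) is handled at the call site
def pvNatBin : Nat → List Char
  | 0 => []
  | m + 1 => pvNatBin ((m + 1) / 2) ++ [if (m + 1) % 2 = 1 then '1' else '0']
decreasing_by exact Nat.div_lt_self (Nat.succ_pos m) (by omega)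

-- bin(integer)[2:] : for i ≥ 0 this is the binary digit string; for i < 0 Python's
-- bin gives '-0b…' so [2:] keeps a leading 'b' — transliterated exactly.
def pvBinTail (i : Int) : List Char :=
  if i < 0 then 'b' :: pvNatBin i.natAbs
  else if i = 0 then ['0']
  else pvNatBin i.natAbs

-- while len(register) < n: register = [0] + register
def pvPadLoop (n : Int) (register : List Int) : List Int :=
  if (register.length : Int) < n then pvPadLoop n ((0 : Int) :: register) else register
termination_by (n - register.length).toNat
decreasing_by simp; omega

def int_as_register (integer : Int) (n : Int) : List Int :=
  let register := (pvBinTail integer).map (fun d => if d = '1' then (1 : Int) else 0)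
  if (register.length : Int) = n then register
  else if (register.length : Int) > n then PySem.List.slice register (some (-n)) none
  else pvPadLoop n register

-- ===== PORT B =====
-- while x > 0: bits.append(x & 1); x >>= 1   (x & 1 = x % 2, x >> 1 = x // 2 for x > 0)
def pvExtract (x : Int) (acc : List Int) : List Int :=
  if x > 0 then pvExtract (PySem.Int.floordiv x 2) (acc ++ [PySem.Int.mod x 2]) else acc
termination_by x.toNat
decreasing_by
  rw [PySem.Int.floordiv_eq_ediv_of_pos (by omega)]
  omega

def int_as_register_alt (integer : Int) (n : Int) : List Int :=
  let bits := (pvExtract integer []).reverse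
  let bits := if bits = [] then [(0 : Int)] else bits
  if (bits.length : Int) < n then List.replicate (n - bits.length).toNat 0 ++ bits
  else PySem.List.slice bits (some (-n)) none

-- ===== PRECONDITION & SPEC =====
-- Pre_ excludes negative integers: the docstring restricts the function to nonnegative
-- integers, and on negatives A's value (bin()'s '-0b' prefix sliced to a stray 'b' digit)
-- and B's value are both unspecified corners no caller would rely on.
def Pre_int_as_register (integer : Int) (n : Int) : Prop := 0 ≤ integer
instance (integer : Int) (n : Int) : Decidable (Pre_int_as_register integer n) := by unfold Pre_int_as_register; infer_instance
def pvWitness_int_as_register : Int × Int := (9, 4)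

def Spec_int_as_register (integer : Int) (n : Int) (out : List Int) : Prop := out = int_as_register_alt integer n
instance (integer : Int) (n : Int) (out : List Int) : Decidable (Spec_int_as_register integer n out) := by unfold Spec_int_as_register; infer_instance

-- ===== CLAIM (what is proved, stated in full; the proofs are below) =====
def Claim_equal_int_as_register : Prop := ∀ (integer : Int) (n : Int), Dom_int_as_register integer n → Pre_int_as_register integer n → Spec_int_as_register integer n (int_as_register integer n)

-- ===== LEMMAS AND PROOFS =====

-- the extraction loop appends the lsb-first digit list of x to acc
lemma pvExtract_acc (x : Int) (acc : List Int) :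
    pvExtract x acc = acc ++ pvExtract x [] := by
  induction hx : x.toNat using Nat.strong_induction_on generalizing x acc with
  | _ m ih =>
    conv_lhs => rw [pvExtract]
    conv_rhs => rw [pvExtract]
    by_cases h : x > 0
    · rw [if_pos h, if_pos h]
      have hlt : (PySem.Int.floordiv x 2).toNat < m := by
        rw [PySem.Int.floordiv_eq_ediv_of_pos (by omega)]; omega
      rw [ih _ hlt _ (acc ++ [PySem.Int.mod x 2]) rfl,
          ih _ hlt _ ([] ++ [PySem.Int.mod x 2]) rfl]
      simp
    · rw [if_neg h, if_neg h]; simp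

-- B's digit list is the reverse of A's bin() digit list, for positive m
lemma pvExtract_eq_bin (m : Nat) (hm : 0 < m) :
    (pvExtract (m : Int) []).reverse = (pvNatBin m).map (fun d => if d = '1' then (1 : Int) else 0) := by
  induction m using Nat.strong_induction_on with
  | _ m ih =>
    match m, hm with
    | m + 1, _ =>
      rw [pvExtract, if_pos (by positivity), pvNatBin]
      have hfd : PySem.Int.floordiv ((m + 1 : Nat) : Int) 2 = (((m + 1) / 2 : Nat) : Int) := by
        exact_mod_cast PySem.Int.floordiv_natCast (m + 1) 2
      have hmd : PySem.Int.mod ((m + 1 : Nat) : Int) 2 = (((m + 1) % 2 : Nat) : Int) := by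
        exact_mod_cast PySem.Int.mod_natCast (m + 1) 2
      rw [pvExtract_acc, hfd, hmd]
      by_cases h2 : 0 < (m + 1) / 2
      · rw [List.map_append]
        have := ih ((m + 1) / 2) (Nat.div_lt_self (Nat.succ_pos m) (by omega)) h2
        simp only [List.reverse_append]
        rw [this]
        have hd : ([(((m + 1) % 2 : Nat) : Int)] : List Int).reverse
            = List.map (fun d => if d = '1' then (1 : Int) else 0) [if (m + 1) % 2 = 1 then '1' else '0'] := by
          simp only [List.reverse_singleton, List.map]
          rcases Nat.mod_two_eq_zero_or_one (m + 1) with h | h <;> simp [h]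
        simp only [List.reverse_nil, List.append_nil] at hd ⊢
        rw [hd]
      · -- (m+1)/2 = 0, so m = 0
        have hm0 : m = 0 := by omega
        subst hm0
        rw [pvExtract, if_neg (by norm_num)]
        simp [pvNatBin]

-- padding loop = replicate in one step
lemma pvPadLoop_eq (n : Int) (register : List Int) :
    pvPadLoop n register = List.replicate (n - register.length).toNat 0 ++ register := by
  by_cases h : (register.length : Int) < n
  · induction hk : (n - register.length).toNat using Nat.strong_induction_on generalizing register with
    | _ k ih =>
      rw [pvPadLoop, if_pos h]
      by_cases h2 : ((((0:Int) :: register).length : Int)) < n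
      · have hlt : (n - (((0:Int) :: register).length : Int)).toNat < k := by simp at h2 ⊢; omega
        rw [ih _ hlt _ h2 rfl, ← hk]
        have : (n - register.length).toNat = (n - (((0:Int) :: register).length : Int)).toNat + 1 := by
          simp; omega
        rw [this, List.replicate_succ']
        simp
      · rw [pvPadLoop, if_neg h2]
        have : (n - register.length).toNat = 1 := by simp at h2; omega
        rw [hk.symm, this]
        simp [List.replicate]
  · rw [pvPadLoop, if_neg h]
    have : (n - register.length).toNat = 0 := by omega
    simp [this]

-- the two digit lists coincide for integer ≥ 0
lemma digits_eq (integer : Int) (h : 0 ≤ integer) :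
    (let b := (pvExtract integer []).reverse; if b = [] then [(0:Int)] else b)
      = (pvBinTail integer).map (fun d => if d = '1' then (1 : Int) else 0) := by
  by_cases h0 : integer = 0
  · subst h0
    rw [pvExtract]
    simp [pvBinTail]
  · have hpos : 0 < integer := by omega
    have hcast : integer = (integer.natAbs : Int) := by omega
    rw [pvBinTail, if_neg (show ¬ integer < 0 by omega), if_neg h0]
    have hb := pvExtract_eq_bin integer.natAbs (Int.natAbs_pos.mpr h0)
    rw [show ((integer.natAbs : Int)) = integer from hcast.symm] at hb
    rw [hb]
    have hne : pvNatBin integer.natAbs ≠ [] := by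
      match hm : integer.natAbs, (show 0 < integer.natAbs by omega) with
      | m + 1, _ => rw [pvNatBin]; simp
    simp [hne]

-- ===== VERDICT (by name: the statement is the Claim_ definition above) =====
theorem int_as_register_spec : Claim_equal_int_as_register := by
  intro integer n _ hpre
  unfold Spec_int_as_register int_as_register int_as_register_alt
  have hd := digits_eq integer hpre
  dsimp only
  dsimp only at hd
  rw [hd]
  set reg := (pvBinTail integer).map (fun d => if d = '1' then (1 : Int) else 0) with hreg
  by_cases h1 : (reg.length : Int) = n
  · rw [if_pos h1, if_neg (by omega)]
    have hlen : reg.length = n.toNat := by omega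
    rw [PySem.List.slice_some_none]
    have : PySem.List.clampIdx reg.length (-n) = 0 := by
      simp [PySem.List.clampIdx]
      split_ifs <;> omega
    simp [this]
  · rw [if_neg h1]
    by_cases h2 : (reg.length : Int) > n
    · rw [if_pos h2, if_neg (by omega)]
    · rw [if_neg h2, if_pos (by omega), pvPadLoop_eq]
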